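-- pv_equiv track=rewrite | github.com/chlnlzrh/lms | scripts/generate_lessons_batch.py | _get_smart_test_lessons
-- ===== SOURCE A (Python) =====
-- from typing import Dict, List, Optional, Tuple
--
-- def _get_smart_test_lessons(lessons: List[dict]) -> List[dict]:
--     """Get smart default test lessons (first of M0, first of M1)."""
--     lessons_by_module = {}
--     for lesson in lessons:
--         module = lesson['MODULE_CODE']
--         if module not in lessons_by_module:
--             lessons_by_module[module] = []
--         lessons_by_module[module].append(lesson)
--
--     smart_lessons = []
--     for module in sorted(lessons_by_module.keys())[:2]:
--         if lessons_by_module[module]: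
--             smart_lessons.append(lessons_by_module[module][0])
--
--     return smart_lessons
-- ===== SOURCE B (Python) =====
-- from typing import Dict, List, Optional, Tuple
--
-- def _get_smart_test_lessons(lessons: List[dict]) -> List[dict]:
--     """Get smart default test lessons (first of M0, first of M1).
--
--     One pass: remember only the FIRST lesson per module code and track the
--     two lexicographically smallest module codes with a best/second pair,
--     so no per-module lists and no sort at the end.
--     """
--     first_by_module = {}
--     best = None
--     second = None
--     for lesson in lessons:
--         module = lesson['MODULE_CODE']
--         if module not in first_by_module:
--             first_by_module[module] = lesson
--             if best is None or module < best:
--                 best, second = module, best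
--             elif second is None or module < second:
--                 second = module
--     result = []
--     if best is not None:
--         result.append(first_by_module[best])
--     if second is not None:
--         result.append(first_by_module[second])
--     return result
-- ===== Notes on version B (the rewrite author's own statement) =====
-- stated objective: alternative
-- what changed: Instead of grouping every lesson into per-module lists and sorting all module codes to slice off two, B makes one pass that stores only the first lesson per module and maintains the two lexicographically smallest codes in a best/second pair, so no per-module lists are built and no sort is performed.
import Mathlib
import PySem

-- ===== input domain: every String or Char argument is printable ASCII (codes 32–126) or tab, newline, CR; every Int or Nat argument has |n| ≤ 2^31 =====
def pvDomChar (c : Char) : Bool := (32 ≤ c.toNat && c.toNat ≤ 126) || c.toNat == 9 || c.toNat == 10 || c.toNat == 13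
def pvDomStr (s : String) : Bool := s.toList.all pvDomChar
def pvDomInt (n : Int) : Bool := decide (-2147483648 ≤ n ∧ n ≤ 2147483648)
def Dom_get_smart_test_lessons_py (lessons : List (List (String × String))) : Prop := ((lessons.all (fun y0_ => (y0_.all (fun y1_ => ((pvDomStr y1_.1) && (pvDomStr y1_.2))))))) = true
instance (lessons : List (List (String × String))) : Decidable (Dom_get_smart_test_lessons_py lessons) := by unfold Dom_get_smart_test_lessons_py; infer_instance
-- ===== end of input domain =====

-- B keeps one pass, stores only the first lesson per module, and tracks the two smallest
-- module codes in a best/second pair instead of sorting all keys; return values agree with A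
-- on every input where A returns (missing 'MODULE_CODE' keys, where A raises KeyError, are
-- excluded by Pre_).

-- ===== PORT A =====
-- lesson['MODULE_CODE']: first-match lookup in the association list; none = KeyError,
-- excluded by Pre_ (the .getD "" default is never reached inside Pre_).
def pvKeyOf (lesson : List (String × String)) : String :=
  ((PySem.Dict.mk lesson).get? "MODULE_CODE").getD ""

-- one iteration of A's grouping loop: setdefault-to-[] then append
def pvAStep (d : PySem.Dict String (List (List (String × String)))) (lesson : List (String × String)) :
    PySem.Dict String (List (List (String × String))) :=
  let m := pvKeyOf lesson
  let d' := if d.contains m then d else d.insert m []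
  d'.modify m [] (fun l => l ++ ([lesson] : List (List (String × String))))

def get_smart_test_lessons_py (lessons : List (List (String × String))) : List (List (String × String)) :=
  let d := lessons.foldl pvAStep PySem.Dict.empty
  -- sorted(keys)[:2] = take 2 of the sorted key list; lessons_by_module[module] cannot
  -- raise (module ∈ keys), so .getD [] is exact; the match is Python's truthiness test + [0]
  ((PySem.List.sorted d.keys (fun x => x) false).take 2).foldl
    (fun acc m =>
      match d.getD m [] with
      | [] => acc
      | h :: _ => acc ++ ([h] : List (List (String × String)))) []

-- ===== PORT B =====
-- one iteration of B's loop over a (first_by_module, best, second) state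
def pvBStep (st : PySem.Dict String (List (String × String)) × Option String × Option String)
    (lesson : List (String × String)) :
    PySem.Dict String (List (String × String)) × Option String × Option String :=
  let m := pvKeyOf lesson
  let e := st.1
  let best := st.2.1
  let second := st.2.2
  if e.contains m then st
  else
    let e' := e.insert m lesson
    if (match best with | none => true | some b => decide (m < b)) then (e', some m, best)
    else if (match second with | none => true | some s => decide (m < s)) then (e', best, some m)
    else (e', best, second)

def get_smart_test_lessons_py_alt (lessons : List (List (String × String))) : List (List (String × String)) :=
  let st := lessons.foldl pvBStep (PySem.Dict.empty, none, none)
  -- first_by_module[best] / [second] cannot raise (both are keys), so .getD [] is exact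
  let r1 := match st.2.1 with
    | none => []
    | some b => [st.1.getD b []]
  match st.2.2 with
  | none => r1
  | some s => r1 ++ [st.1.getD s []]

-- ===== PRECONDITION & SPEC =====
-- Pre_ excludes exactly the inputs where A raises KeyError: a lesson without a
-- 'MODULE_CODE' key.
def Pre_get_smart_test_lessons_py (lessons : List (List (String × String))) : Prop :=
  ∀ lesson ∈ lessons, "MODULE_CODE" ∈ lesson.map (·.1)
instance (lessons : List (List (String × String))) : Decidable (Pre_get_smart_test_lessons_py lessons) := by unfold Pre_get_smart_test_lessons_py; infer_instance

def pvWitness_get_smart_test_lessons_py : (List (List (String × String))) :=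
  [[("MODULE_CODE", "M1"), ("TITLE", "b")], [("MODULE_CODE", "M0"), ("TITLE", "a")]]

def Spec_get_smart_test_lessons_py (lessons : List (List (String × String))) (out : List (List (String × String))) : Prop := out = get_smart_test_lessons_py_alt lessons
instance (lessons : List (List (String × String))) (out : List (List (String × String))) : Decidable (Spec_get_smart_test_lessons_py lessons out) := by unfold Spec_get_smart_test_lessons_py; infer_instance

-- ===== CLAIM (what is proved, stated in full; the proofs are below) =====
def Claim_equal_get_smart_test_lessons_py : Prop := ∀ (lessons : List (List (String × String))), Dom_get_smart_test_lessons_py lessons → Pre_get_smart_test_lessons_py lessons → Spec_get_smart_test_lessons_py lessons (get_smart_test_lessons_py lessons)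

-- ===== LEMMAS AND PROOFS =====

-- [b] / [b; s] as a list, for the best/second pair
def pvOlist (b s : Option String) : List String :=
  (match b with | none => [] | some x => [x]) ++ (match s with | none => [] | some x => [x])

theorem pvAStep_getD (d : PySem.Dict String (List (List (String × String))))
    (lesson : List (String × String)) (c : String) :
    (pvAStep d lesson).getD c [] =
      if c = pvKeyOf lesson then d.getD (pvKeyOf lesson) [] ++ ([lesson] : List (List (String × String))) else d.getD c [] := by
  unfold pvAStep
  by_cases hc : d.contains (pvKeyOf lesson)
  · simp [hc, PySem.Dict.getD_modify]
  · simp only [Bool.not_eq_true] at hc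
    simp [hc, PySem.Dict.getD_modify, PySem.Dict.getD_insert,
      PySem.Dict.getD_of_not_contains d _ hc]
    split_ifs <;> rfl

theorem pvAStep_keys (d : PySem.Dict String (List (List (String × String))))
    (lesson : List (String × String)) :
    (pvAStep d lesson).keys = PySem.Set.add d.keys (pvKeyOf lesson) := by
  unfold pvAStep
  by_cases hc : d.contains (pvKeyOf lesson)
  · rw [PySem.Set.add_of_mem ((PySem.Dict.contains_iff_mem_keys d _).mp hc)]
    simp [hc, PySem.Dict.keys_modify, PySem.Dict.keys_insert_of_contains _ _ hc]
  · simp only [Bool.not_eq_true] at hc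
    rw [PySem.Set.add_of_not_mem (fun hm => by
      simp [(PySem.Dict.contains_iff_mem_keys d _).mpr hm] at hc)]
    simp [hc, PySem.Dict.keys_modify,
      PySem.Dict.keys_insert_of_not_contains d _ hc,
      PySem.Dict.keys_insert_of_contains]

-- A's grouping loop: keys in first-occurrence order, value = all lessons of that module
theorem pvA_loop (ls : List (List (String × String)))
    (d : PySem.Dict String (List (List (String × String)))) :
    (ls.foldl pvAStep d).keys = PySem.Set.update d.keys (ls.map pvKeyOf) ∧
    ∀ c, (ls.foldl pvAStep d).getD c [] =
      d.getD c [] ++ (ls.filter (fun l => pvKeyOf l == c)) := by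
  induction ls generalizing d with
  | nil => simp [PySem.Set.update]
  | cons l ls ih =>
    obtain ⟨ihk, ihg⟩ := ih (pvAStep d l)
    refine ⟨?_, ?_⟩
    · rw [List.foldl_cons, ihk, pvAStep_keys, List.map_cons, PySem.Set.update_cons]
    · intro c
      rw [List.foldl_cons, ihg c, pvAStep_getD]
      by_cases hc : pvKeyOf l = c
      · subst hc; simp
      · simp [hc, Ne.symm hc]

-- B's loop invariant: same keys, first lesson per module, and the best/second pair
-- lists the two smallest keys in order
theorem pvB_loop (ls : List (List (String × String)))
    (e : PySem.Dict String (List (String × String))) (b s : Option String)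
    (hnd : e.keys.Nodup)
    (hol : pvOlist b s = (PySem.List.sorted e.keys (fun x => x) false).take 2)
    (hbs : b = none → s = none) :
    (ls.foldl pvBStep (e, b, s)).1.keys = PySem.Set.update e.keys (ls.map pvKeyOf) ∧
    (∀ c, (ls.foldl pvBStep (e, b, s)).1.get? c =
      (if e.contains c then e.get? c else (ls.filter (fun l => pvKeyOf l == c)).head?)) ∧
    pvOlist (ls.foldl pvBStep (e, b, s)).2.1 (ls.foldl pvBStep (e, b, s)).2.2 =
      (PySem.List.sorted (ls.foldl pvBStep (e, b, s)).1.keys (fun x => x) false).take 2 ∧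
    ((ls.foldl pvBStep (e, b, s)).2.1 = none → (ls.foldl pvBStep (e, b, s)).2.2 = none) := by
  induction ls generalizing e b s with
  | nil =>
    refine ⟨by simp [PySem.Set.update], ?_, hol, hbs⟩
    intro c
    by_cases hc : e.contains c
    · simp [hc]
    · simp only [Bool.not_eq_true] at hc
      have : e.get? c = none := (PySem.Dict.get?_eq_none_iff_not_mem_keys e c).mpr
        (fun h => by simp [(PySem.Dict.contains_iff_mem_keys e c).mpr h] at hc)
      simp [hc, this]
  | cons l ls ih =>
    set m := pvKeyOf l with hm
    by_cases hc : e.contains m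
    · -- key already present: state unchanged
      have hstep : pvBStep (e, b, s) l = (e, b, s) := by
        unfold pvBStep; simp [← hm, hc]
      rw [List.foldl_cons, hstep]
      obtain ⟨ihk, ihg, ihol, ihbs⟩ := ih e b s hnd hol hbs
      refine ⟨?_, ?_, ihol, ihbs⟩
      · rw [ihk, List.map_cons, PySem.Set.update_cons,
          PySem.Set.add_of_mem ((PySem.Dict.contains_iff_mem_keys e m).mp hc)]
      · intro c
        rw [ihg c]
        by_cases hcc : e.contains c
        · simp [hcc]
        · have hne : ¬ (m = c) := fun h => by rw [h] at hc; exact absurd hc (by simp [hcc])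
          simp [hcc, ← hm, hne]
    · -- new key: insert and update the best/second pair
      simp only [Bool.not_eq_true] at hc
      have hmem : m ∉ e.keys := fun h =>
        by simp [(PySem.Dict.contains_iff_mem_keys e m).mpr h] at hc
      have hkeys' : (e.insert m l).keys = e.keys ++ [m] :=
        PySem.Dict.keys_insert_of_not_contains e l hc
      have hnd' : (e.insert m l).keys.Nodup := by
        rw [hkeys']
        refine List.Nodup.append hnd (List.nodup_singleton m) ?_
        intro a ha hb
        rw [List.mem_singleton] at hb
        subst hb; exact hmem ha
      have hsorted' : PySem.List.sorted (e.insert m l).keys (fun x => x) false =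
          PySem.List.insertBy (fun a b => decide (a < b)) m
            (PySem.List.sorted e.keys (fun x => x) false) := by
        rw [hkeys', PySem.List.sorted_eq_foldl_insertBy, PySem.List.sorted_eq_foldl_insertBy,
          List.foldl_append]
        rfl
      -- after the insert, the remaining loop keeps the invariant
      have hmain : ∀ (b' s' : Option String),
          pvOlist b' s' = (PySem.List.sorted (e.insert m l).keys (fun x => x) false).take 2 →
          (b' = none → s' = none) →
          (ls.foldl pvBStep (e.insert m l, b', s')).1.keys =
              PySem.Set.update e.keys ((l :: ls).map pvKeyOf) ∧
          (∀ c, (ls.foldl pvBStep (e.insert m l, b', s')).1.get? c =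
            (if e.contains c then e.get? c
             else ((l :: ls).filter (fun x => pvKeyOf x == c)).head?)) ∧
          pvOlist (ls.foldl pvBStep (e.insert m l, b', s')).2.1
              (ls.foldl pvBStep (e.insert m l, b', s')).2.2 =
            (PySem.List.sorted (ls.foldl pvBStep (e.insert m l, b', s')).1.keys
              (fun x => x) false).take 2 ∧
          ((ls.foldl pvBStep (e.insert m l, b', s')).2.1 = none →
            (ls.foldl pvBStep (e.insert m l, b', s')).2.2 = none) := by
        intro b' s' hol' hbs'
        obtain ⟨ihk, ihg, ihol, ihbs⟩ := ih (e.insert m l) b' s' hnd' hol' hbs'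
        refine ⟨?_, ?_, ihol, ihbs⟩
        · rw [ihk, hkeys', List.map_cons, PySem.Set.update_cons,
            PySem.Set.add_of_not_mem hmem, hm]
        · intro c
          rw [ihg c]
          by_cases hmc : m = c
          · subst hmc
            simp [hc, ← hm]
          · by_cases hcc : e.contains c
            · simp [hcc, PySem.Dict.contains_insert, PySem.Dict.get?_insert, Ne.symm hmc]
            · simp [hcc, PySem.Dict.contains_insert, Ne.symm hmc, hmc, ← hm]
      -- case analysis on the old sorted key list / pair
      rcases hsk : PySem.List.sorted e.keys (fun x => x) false with _ | ⟨a, rest⟩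
      · -- no keys yet: b = s = none, the first test fires
        have hb : b = none := by
          rw [hsk] at hol
          cases b <;> cases s <;> simp [pvOlist] at hol ⊢
        have hs : s = none := hbs hb
        subst hb; subst hs
        have hstep : pvBStep (e, none, none) l = (e.insert m l, some m, none) := by
          unfold pvBStep; simp [← hm, hc]
        rw [List.foldl_cons, hstep]
        exact hmain (some m) none
          (by rw [hsorted', hsk]; simp [pvOlist, PySem.List.insertBy]) (by simp)
      rcases rest with _ | ⟨a2, rest2⟩
      · -- exactly one key a: b = some a, s = none
        have hpair : b = some a ∧ s = none := by
          rw [hsk] at hol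
          cases b with
          | none => exact absurd (hbs rfl) (by rintro rfl; simp [pvOlist] at hol)
          | some x =>
            cases s with
            | none => simpa [pvOlist] using hol
            | some y => simp [pvOlist] at hol
        obtain ⟨hb, hs⟩ := hpair; subst hb; subst hs
        by_cases hlt : m < a
        · have hstep : pvBStep (e, some a, none) l = (e.insert m l, some m, some a) := by
            unfold pvBStep; simp [← hm, hc, hlt]
          rw [List.foldl_cons, hstep]
          exact hmain (some m) (some a)
            (by rw [hsorted', hsk]; simp [pvOlist, PySem.List.insertBy, hlt]) (by simp)
        · have hstep : pvBStep (e, some a, none) l = (e.insert m l, some a, some m) := by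
            unfold pvBStep; simp [← hm, hc, hlt]
          rw [List.foldl_cons, hstep]
          exact hmain (some a) (some m)
            (by rw [hsorted', hsk]; simp [pvOlist, PySem.List.insertBy, hlt]) (by simp)
      · -- at least two keys: b = some a, s = some a2
        have hpair : b = some a ∧ s = some a2 := by
          rw [hsk] at hol
          cases b with
          | none => exact absurd (hbs rfl) (by rintro rfl; simp [pvOlist] at hol)
          | some x =>
            cases s with
            | none => simp [pvOlist] at hol
            | some y => simpa [pvOlist] using hol
        obtain ⟨hb, hs⟩ := hpair; subst hb; subst hs
        by_cases hlt : m < a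
        · have hstep : pvBStep (e, some a, some a2) l = (e.insert m l, some m, some a) := by
            unfold pvBStep; simp [← hm, hc, hlt]
          rw [List.foldl_cons, hstep]
          exact hmain (some m) (some a)
            (by rw [hsorted', hsk]; simp [pvOlist, PySem.List.insertBy, hlt]) (by simp)
        · by_cases hlt2 : m < a2
          · have hstep : pvBStep (e, some a, some a2) l = (e.insert m l, some a, some m) := by
              unfold pvBStep; simp [← hm, hc, hlt, hlt2]
            rw [List.foldl_cons, hstep]
            exact hmain (some a) (some m)
              (by rw [hsorted', hsk]; simp [pvOlist, PySem.List.insertBy, hlt, hlt2]) (by simp)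
          · have hstep : pvBStep (e, some a, some a2) l = (e.insert m l, some a, some a2) := by
              unfold pvBStep; simp [← hm, hc, hlt, hlt2]
            rw [List.foldl_cons, hstep]
            exact hmain (some a) (some a2)
              (by rw [hsorted', hsk]; simp [pvOlist, PySem.List.insertBy, hlt, hlt2]) (by simp)

-- ===== VERDICT (by name: the statement is the Claim_ definition above) =====
theorem get_smart_test_lessons_py_spec : Claim_equal_get_smart_test_lessons_py := by
  intro lessons _ _
  unfold Spec_get_smart_test_lessons_py
  obtain ⟨hak, hag⟩ := pvA_loop lessons PySem.Dict.empty
  have hsnil : PySem.List.sorted ((PySem.Dict.empty (κ := String) (ν := List (String × String))).keys)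
      (fun x => x) false = [] := by
    rw [PySem.Dict.keys_empty]
    exact (PySem.List.sorted_eq_nil_iff _ _ _).mpr rfl
  obtain ⟨hbk, hbg, hbol, _⟩ := pvB_loop lessons PySem.Dict.empty none none
    (by simp [PySem.Dict.keys_empty]) (by rw [hsnil]; rfl) (by simp)
  rw [PySem.Dict.keys_empty] at hak hbk
  set st := lessons.foldl pvBStep (PySem.Dict.empty, none, none) with hst
  set d := lessons.foldl pvAStep PySem.Dict.empty with hd
  -- the two dicts hold the same keys in the same order
  have hkeq : d.keys = st.1.keys := by rw [hak, hbk]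
  -- each module selected by A occurs in lessons
  have hmemK : ∀ m ∈ (PySem.List.sorted d.keys (fun x => x) false).take 2,
      ∃ l ∈ lessons, pvKeyOf l = m := by
    intro m hm
    have h1 : m ∈ d.keys := (PySem.List.mem_sorted _ _ _ m).mp (List.take_subset 2 _ hm)
    rw [hak] at h1
    have h2 := (PySem.Set.mem_update _ _ _).mp h1
    simpa using h2
  -- A's second loop = map of B's first-lesson lookups over the selected modules
  have hfold : ((PySem.List.sorted d.keys (fun x => x) false).take 2).foldl
      (fun acc m => match d.getD m [] with
        | [] => acc
        | h :: _ => acc ++ ([h] : List (List (String × String)))) [] =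
      ((PySem.List.sorted d.keys (fun x => x) false).take 2).map (fun m => st.1.getD m []) := by
    rw [PySem.List.foldl_congr_mem _ _ (fun acc m => acc ++ [st.1.getD m []]) _ ?_]
    · simpa using PySem.List.foldl_append_singleton_eq_map (fun m => st.1.getD m [])
        ((PySem.List.sorted d.keys (fun x => x) false).take 2) []
    · intro acc m hm
      obtain ⟨l, hl, hkl⟩ := hmemK m hm
      have hfil : lessons.filter (fun x => pvKeyOf x == m) ≠ [] := by
        intro hnil
        have := List.filter_eq_nil_iff.mp hnil l hl
        simp [hkl] at this
      rcases hfe : lessons.filter (fun x => pvKeyOf x == m) with _ | ⟨h, t⟩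
      · exact absurd hfe hfil
      · have hda : d.getD m [] = h :: t := by
          have := hag m
          rw [hfe] at this
          simpa [PySem.Dict.getD_empty] using this
        have hbv : st.1.getD m [] = h := by
          rw [PySem.Dict.getD_eq_get?_getD, hbg m, hfe]
          simp [PySem.Dict.contains_empty]
        simp [hda, hbv]
  -- B's two final appends = map of the lookups over the best/second pair
  have hbeq : get_smart_test_lessons_py_alt lessons =
      (pvOlist st.2.1 st.2.2).map (fun k => st.1.getD k []) := by
    unfold get_smart_test_lessons_py_alt
    rw [← hst]
    cases h1 : st.2.1 <;> cases h2 : st.2.2 <;> simp [h1, h2, pvOlist]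
  rw [hbeq, hbol, ← hkeq]
  unfold get_smart_test_lessons_py
  rw [← hd]
  exact hfold
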